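-- pv_equiv track=rewrite | github.com/YuriiKhomych/ITEA_AC | Sergey_Naumchick/L_1_functions/task_8_operations.py | sorting_by
-- ===== SOURCE A (Python) =====
-- def sorting_by(insights, key):
--     result = []
--     for elemen in insights:
--         if key in elemen.keys():
--             result.append(elemen)
--     result.sort(key=lambda x: x[key])
--
--     for elemen in insights:
--         if key not in elemen.keys():
--             result.append(elemen)
--     return result
-- ===== SOURCE B (Python) =====
-- def sorting_by(insights, key):
--     # Single stable sort with a composite key: keyed dicts first (tag 0, ordered
--     # by their value), keyless dicts last (tag 1); stability keeps original order.
--     return sorted(insights, key=lambda x: (0, x[key]) if key in x else (1, 0))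
-- ===== Notes on version B (the rewrite author's own statement) =====
-- stated objective: idiomatic
-- what changed: Replaced the two filtering passes plus sort-and-append with one stable sorted() call over the whole list using a composite (tag, value) key that puts keyed dicts first in value order and keyless dicts last in original order.
import Mathlib
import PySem

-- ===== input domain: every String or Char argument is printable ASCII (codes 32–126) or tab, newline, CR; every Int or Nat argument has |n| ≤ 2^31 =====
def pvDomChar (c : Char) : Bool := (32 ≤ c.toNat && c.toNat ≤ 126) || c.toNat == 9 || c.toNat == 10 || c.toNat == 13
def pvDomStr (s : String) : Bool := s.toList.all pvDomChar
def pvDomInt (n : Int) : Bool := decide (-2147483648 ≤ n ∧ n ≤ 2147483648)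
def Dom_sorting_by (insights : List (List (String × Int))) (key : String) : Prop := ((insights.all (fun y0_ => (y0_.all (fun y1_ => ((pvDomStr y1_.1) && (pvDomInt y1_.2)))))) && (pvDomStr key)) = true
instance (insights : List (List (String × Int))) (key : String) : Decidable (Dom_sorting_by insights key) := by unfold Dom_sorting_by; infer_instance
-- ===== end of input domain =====

-- B replaces A's partition + sort + append with one stable sort under a composite
-- (tag, value) key — an idiomatic one-call decomposition; same asymptotic cost.


-- ===== PORT A =====
-- shared dict primitives: lookup (first match), membership, and d[key]
-- (valOf is only ever applied where the key is present, so the .getD 0 default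
-- is exact for Python's x[key] there)
def pvLook (d : List (String × Int)) (k : String) : Option Int := (PySem.Dict.mk d).get? k
def pvHasKey (d : List (String × Int)) (k : String) : Bool := (pvLook d k).isSome
def pvValOf (d : List (String × Int)) (k : String) : Int := (pvLook d k).getD 0

def sorting_by (insights : List (List (String × Int))) (key : String) : List (List (String × Int)) :=
  -- result = []; for elemen in insights: if key in elemen.keys(): result.append(elemen)
  let result := insights.foldl (fun r e => if pvHasKey e key then r ++ [e] else r) []
  -- result.sort(key=lambda x: x[key])
  let result := PySem.List.sorted result (fun x => pvValOf x key)
  -- for elemen in insights: if key not in elemen.keys(): result.append(elemen)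
  insights.foldl (fun r e => if !pvHasKey e key then r ++ [e] else r) result

-- ===== PORT B =====
def sorting_by_alt (insights : List (List (String × Int))) (key : String) : List (List (String × Int)) :=
  -- sorted(insights, key=lambda x: (0, x[key]) if key in x else (1, 0))
  PySem.List.sorted2 insights
    (fun x => if pvHasKey x key then (0 : Int) else 1)
    (fun x => if pvHasKey x key then pvValOf x key else 0)

-- ===== PRECONDITION & SPEC =====
def Spec_sorting_by (insights : List (List (String × Int))) (key : String) (out : List (List (String × Int))) : Prop := out = sorting_by_alt insights key
instance (insights : List (List (String × Int))) (key : String) (out : List (List (String × Int))) : Decidable (Spec_sorting_by insights key out) := by unfold Spec_sorting_by; infer_instance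

-- ===== CLAIM (what is proved, stated in full; the proofs are below) =====
def Claim_equal_sorting_by : Prop := ∀ (insights : List (List (String × Int))) (key : String), Dom_sorting_by insights key → Spec_sorting_by insights key (sorting_by insights key)

-- ===== LEMMAS AND PROOFS =====

-- peeling the last element off the foldl-of-insertBy behind sorted / sorted2
theorem pv_sorted_snoc {α κ : Type} [LT κ] [DecidableLT κ] (xs : List α) (x : α) (key : α → κ) :
    PySem.List.sorted (xs ++ [x]) key
      = PySem.List.insertBy (fun a b => decide (key a < key b)) x (PySem.List.sorted xs key) := by
  simp [PySem.List.sorted, List.foldl_append]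

theorem pv_sorted2_snoc {α κ₁ κ₂ : Type} [LT κ₁] [DecidableLT κ₁] [LT κ₂] [DecidableLT κ₂]
    (xs : List α) (x : α) (k1 : α → κ₁) (k2 : α → κ₂) :
    PySem.List.sorted2 (xs ++ [x]) k1 k2
      = PySem.List.insertBy
          (fun a b => decide (k1 a < k1 b) || !decide (k1 b < k1 a) && decide (k2 a < k2 b))
          x (PySem.List.sorted2 xs k1 k2) := by
  simp [PySem.List.sorted2, List.foldl_append]

-- inserting x into ys ++ zs, when 'before' agrees with 'before'' on ys and x goes
-- before everything in zs, is inserting x into ys (with before') and keeping zs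
theorem pv_insertBy_append {α : Type} (before before' : α → α → Bool) (x : α)
    (ys zs : List α) (h1 : ∀ y ∈ ys, before x y = before' x y)
    (h2 : ∀ z ∈ zs, before x z = true) :
    PySem.List.insertBy before x (ys ++ zs) = PySem.List.insertBy before' x ys ++ zs := by
  induction ys with
  | nil =>
    cases zs with
    | nil => rfl
    | cons z zs =>
      simp only [List.nil_append, PySem.List.insertBy]
      rw [h2 z (by simp)]
      rfl
  | cons y ys ih =>
    simp only [List.cons_append, PySem.List.insertBy]
    rw [h1 y (by simp)]
    by_cases hb : before' x y = true
    · simp [hb]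
    · simp only [Bool.not_eq_true] at hb
      simp only [hb]
      rw [ih (fun y hy => h1 y (by simp [hy]))]
      simp

-- the central fact: the composite-key stable sort equals
-- sort-of-the-keyed-part ++ keyless-part-in-order
theorem pv_sorted2_split (key : String) (xs : List (List (String × Int))) :
    PySem.List.sorted2 xs
      (fun x => if pvHasKey x key then (0 : Int) else 1)
      (fun x => if pvHasKey x key then pvValOf x key else 0)
    = PySem.List.sorted (xs.filter (fun x => pvHasKey x key)) (fun x => pvValOf x key)
      ++ xs.filter (fun x => !pvHasKey x key) := by
  induction xs using List.reverseRecOn with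
  | nil => rfl
  | append_singleton xs x ih =>
    rw [pv_sorted2_snoc, ih, List.filter_append, List.filter_append]
    by_cases hx : pvHasKey x key = true
    · simp only [List.filter_cons, List.filter_nil, hx, Bool.not_true, if_true,
        Bool.false_eq_true, if_false, List.append_nil]
      rw [pv_sorted_snoc]
      refine pv_insertBy_append _ _ _ _ _ ?_ ?_
      · intro y hy
        have hy' : pvHasKey y key = true := by
          have := List.of_mem_filter ((PySem.List.mem_sorted _ _ _ _).mp hy)
          simpa using this
        simp [hx, hy']
      · intro z hz
        have hz' : pvHasKey z key = false := by
          have := List.of_mem_filter hz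
          simpa using this
        simp [hx, hz']
    · simp only [Bool.not_eq_true] at hx
      simp only [List.filter_cons, List.filter_nil, hx, Bool.not_false, if_true,
        Bool.false_eq_true, if_false, List.append_nil]
      rw [PySem.List.insertBy_of_forall_not_before]
      · simp
      · intro z hz
        rcases List.mem_append.mp hz with hzS | hzN
        · have hz' : pvHasKey z key = true := by
            have := List.of_mem_filter ((PySem.List.mem_sorted _ _ _ _).mp hzS)
            simpa using this
          simp [hx, hz']
        · have hz' : pvHasKey z key = false := by
            have := List.of_mem_filter hzN
            simpa using this
          simp [hx, hz']

-- ===== VERDICT (by name: the statement is the Claim_ definition above) =====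
theorem sorting_by_spec : Claim_equal_sorting_by := by
  intro insights key _
  show sorting_by insights key = sorting_by_alt insights key
  show List.foldl (fun r e => if !pvHasKey e key then r ++ [e] else r)
      (PySem.List.sorted
        (List.foldl (fun r e => if pvHasKey e key then r ++ [e] else r) [] insights)
        (fun x => pvValOf x key)) insights
    = sorting_by_alt insights key
  unfold sorting_by_alt
  rw [pv_sorted2_split]
  have h1 : List.foldl (fun r e => if pvHasKey e key then r ++ [e] else r) [] insights =
      insights.filter (fun x => pvHasKey x key) := by
    simpa using PySem.List.foldl_append_if (fun e => pvHasKey e key) id insights []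
  rw [h1]
  have h2 := PySem.List.foldl_append_if (fun e => !pvHasKey e key) id insights
    (PySem.List.sorted (insights.filter (fun x => pvHasKey x key)) (fun x => pvValOf x key))
  simpa using h2
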